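-- pv_equiv track=rewrite | github.com/exit-for/--245 | Задание 9/9.2.py | kekw
-- ===== SOURCE A (Python) =====
-- def kekw(matrix):
--     max_value = float('-inf')
--     max_row, max_col = 0, 0
--
--     for i in range(len(matrix)):
--         for j in range(len(matrix[i])):
--             if matrix[i][j] > max_value:
--                 max_value = matrix[i][j]
--                 max_row, max_col = i, j
--
--     matrix[0], matrix[max_row] = matrix[max_row], matrix[0]
--
--     for i in range(len(matrix)):
--         matrix[i][0], matrix[i][max_col] = matrix[i][max_col], matrix[i][0]
--
--     return matrix
-- ===== SOURCE B (Python) =====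
-- def kekw(matrix):
--     # Two-stage argmax: per-row maxima, then global pick; mutates matrix in place like A.
--     row_bests = [max(row) for row in matrix]
--     v = max(row_bests)
--     r = row_bests.index(v)
--     c = matrix[r].index(v)
--     matrix[0], matrix[r] = matrix[r], matrix[0]
--     for row in matrix:
--         row[0], row[c] = row[c], row[0]
--     return matrix
-- ===== Notes on version B (the rewrite author's own statement) =====
-- stated objective: simpler
-- what changed: Replaces the hand-rolled nested index loop with -inf sentinel by a two-stage argmax (per-row maxima via built-in max, then first row/column achieving the global max via list.index), and the index-based column-swap loop by a direct per-row swap; tie-breaking (first row-major occurrence) preserved.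
import Mathlib
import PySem

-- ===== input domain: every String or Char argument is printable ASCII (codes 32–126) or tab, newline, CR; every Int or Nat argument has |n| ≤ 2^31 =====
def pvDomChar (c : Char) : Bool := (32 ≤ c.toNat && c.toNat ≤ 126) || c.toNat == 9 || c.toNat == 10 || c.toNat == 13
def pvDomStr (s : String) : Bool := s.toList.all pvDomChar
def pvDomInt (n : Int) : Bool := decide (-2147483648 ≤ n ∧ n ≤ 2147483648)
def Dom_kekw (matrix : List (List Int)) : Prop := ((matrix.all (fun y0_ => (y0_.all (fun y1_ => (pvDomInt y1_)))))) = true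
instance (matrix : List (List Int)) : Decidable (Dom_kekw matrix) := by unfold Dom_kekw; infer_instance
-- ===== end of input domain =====

-- B replaces A's hand-rolled nested argmax loop (with a -inf sentinel) by per-row maxima + list.index,
-- and the index-based column-swap loop by a direct per-row swap; both mutate the argument in place the
-- same way, so the proved equivalence about the return value also covers the observable mutation.

-- ===== PORT A =====
-- 'max_value > -inf' comparison: none plays float('-inf'), which every int exceeds (exact here).
def ltO (mv : Option Int) (x : Int) : Bool :=
  match mv with
  | none => true
  | some v => decide (v < x)

-- A's first nested loop: running (max_value, max_row, max_col) over i, j.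
def kekwScan (matrix : List (List Int)) : Option Int × Nat × Nat :=
  (List.range matrix.length).foldl
    (fun s i =>
      let row := matrix.getD i []
      (List.range row.length).foldl
        (fun s j =>
          let x := row.getD j 0
          if ltO s.1 x then (some x, i, j) else s)
        s)
    ((none : Option Int), 0, 0)

-- A's second loop: for i in range(len(matrix)): swap matrix[i][0] and matrix[i][max_col], by index.
def kekwColSwap (mc : Nat) (m : List (List Int)) : List (List Int) :=
  (List.range m.length).foldl
    (fun m i =>
      let row := m.getD i []
      m.set i ((row.set 0 (row.getD mc 0)).set mc (row.getD 0 0)))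
    m

def kekw (matrix : List (List Int)) : List (List Int) :=
  let s := kekwScan matrix
  let mr := s.2.1
  let mc := s.2.2
  let m1 := (matrix.set 0 (matrix.getD mr [])).set mr (matrix.getD 0 [])
  kekwColSwap mc m1

-- ===== PORT B =====
def kekw_alt (matrix : List (List Int)) : List (List Int) :=
  let rowBests := matrix.map (fun row => (PySem.List.max? row (fun y => y)).getD 0)
  let v := (PySem.List.max? rowBests (fun y => y)).getD 0
  let r := (PySem.List.index? rowBests v).getD 0
  let c := (PySem.List.index? (matrix.getD r []) v).getD 0
  let m1 := (matrix.set 0 (matrix.getD r [])).set r (matrix.getD 0 [])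
  m1.map (fun row => (row.set 0 (row.getD c 0)).set c (row.getD 0 0))

-- helpers used by Pre_ below: max of a nonempty list and first index of a value
def maxOf : List Int → Int
  | [] => 0
  | x :: xs => xs.foldl max x

def idxOf (v : Int) : List Int → Nat
  | [] => 0
  | x :: xs => if x = v then 0 else idxOf v xs + 1

-- ===== PRECONDITION & SPEC =====
-- Pre_ is exactly the inputs on which A returns normally: the matrix and all its rows are nonempty and
-- every row is long enough to contain the column of the (row-major first) maximum; otherwise A raises
-- IndexError in one of its swaps.
def Pre_kekw (matrix : List (List Int)) : Prop :=
  matrix ≠ [] ∧ (∀ row ∈ matrix, row ≠ []) ∧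
  ∀ row ∈ matrix,
    idxOf (maxOf (matrix.map maxOf))
      (matrix.getD (idxOf (maxOf (matrix.map maxOf)) (matrix.map maxOf)) []) < row.length

instance (matrix : List (List Int)) : Decidable (Pre_kekw matrix) := by unfold Pre_kekw; infer_instance

def pvWitness_kekw : List (List Int) := [[1, 2], [4, 3]]

def Spec_kekw (matrix : List (List Int)) (out : List (List Int)) : Prop := out = kekw_alt matrix
instance (matrix : List (List Int)) (out : List (List Int)) : Decidable (Spec_kekw matrix out) := by unfold Spec_kekw; infer_instance

-- ===== CLAIM (what is proved, stated in full; the proofs are below) =====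
def Claim_equal_kekw : Prop := ∀ (matrix : List (List Int)), Dom_kekw matrix → Pre_kekw matrix → Spec_kekw matrix (kekw matrix)

-- ===== LEMMAS AND PROOFS =====

-- a fold that also carries the running index, structurally on the list
def idxFold {α S : Type} (g : S → Nat → α → S) : Nat → List α → S → S
  | _, [], s => s
  | k, x :: xs, s => idxFold g (k + 1) xs (g s k x)

theorem getD_append_len {α : Type} (acc : List α) (x : α) (rest : List α) (d : α) :
    (acc ++ x :: rest).getD acc.length d = x := by
  induction acc with
  | nil => rfl
  | cons a t ih => simp

theorem set_append_len {α : Type} (acc : List α) (x : α) (rest : List α) (y : α) :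
    (acc ++ x :: rest).set acc.length y = acc ++ y :: rest := by
  induction acc with
  | nil => rfl
  | cons a t ih => simp [ih]

-- bridge: a Python 'for j in range(len(L)): … L[j] …' loop is the indexed structural fold
theorem foldl_range'_getD {α S : Type} (g : S → Nat → α → S) (d : α) (L : List α) :
    ∀ (rest pre : List α), L = pre ++ rest → ∀ (s : S),
      (List.range' pre.length rest.length).foldl (fun s j => g s j (L.getD j d)) s
        = idxFold g pre.length rest s := by
  intro rest
  induction rest with
  | nil => intro pre h s; simp [idxFold]
  | cons x xs ih =>
    intro pre h s
    simp only [List.length_cons]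
    rw [List.range'_succ, List.foldl_cons]
    have hx : L.getD pre.length d = x := by rw [h]; exact getD_append_len ..
    rw [hx]
    have h' : L = (pre ++ [x]) ++ xs := by simp [h]
    have := ih (pre ++ [x]) h' (g s pre.length x)
    simpa [idxFold] using this

theorem foldl_range_getD {α S : Type} (g : S → Nat → α → S) (d : α) (L : List α) (s : S) :
    (List.range L.length).foldl (fun s j => g s j (L.getD j d)) s = idxFold g 0 L s := by
  rw [List.range_eq_range']
  exact foldl_range'_getD g d L L [] rfl s

-- the outer-loop body of A's scan (one full inner loop), and the inner-loop step
def gOuter (s : Option Int × Nat × Nat) (i : Nat) (row : List Int) : Option Int × Nat × Nat :=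
  (List.range row.length).foldl
    (fun s j =>
      let x := row.getD j 0
      if ltO s.1 x then (some x, i, j) else s)
    s

def gInner (i : Nat) (s : Option Int × Nat × Nat) (j : Nat) (x : Int) : Option Int × Nat × Nat :=
  if ltO s.1 x then (some x, i, j) else s

theorem foldl_max_init (t : List Int) : ∀ a b : Int, t.foldl max (max a b) = max a (t.foldl max b) := by
  induction t with
  | nil => intro a b; rfl
  | cons y t ih =>
    intro a b
    simp only [List.foldl_cons]
    rw [max_assoc, ih]

theorem le_foldl_max_self (t : List Int) (a : Int) : a ≤ t.foldl max a := by
  induction t generalizing a with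
  | nil => exact le_refl a
  | cons y t ih => exact le_trans (le_max_left a y) (ih (max a y))

theorem maxOf_cons (x : Int) (xs : List Int) : maxOf (x :: xs) = xs.foldl max x := rfl

theorem idxOf_cons_ne (x v : Int) (xs : List Int) (h : x ≠ v) : idxOf v (x :: xs) = idxOf v xs + 1 := by
  simp [idxOf, h]

theorem inner_some (i : Nat) : ∀ (xs : List Int) (k : Nat) (m : Int) (pr pc : Nat),
    idxFold (gInner i) k xs (some m, pr, pc)
      = (some (xs.foldl max m),
         if m < xs.foldl max m then (i, k + idxOf (xs.foldl max m) xs) else (pr, pc)) := by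
  intro xs
  induction xs with
  | nil => intro k m pr pc; simp [idxFold]
  | cons x xs ih =>
    intro k m pr pc
    simp only [idxFold, gInner, ltO, List.foldl_cons]
    by_cases hmx : m < x
    · rw [if_pos (by simpa using hmx)]
      rw [ih]
      have hmax : max m x = x := max_eq_right (le_of_lt hmx)
      rw [hmax]
      have hxF : x ≤ xs.foldl max x := le_foldl_max_self xs x
      have hmF : m < xs.foldl max x := lt_of_lt_of_le hmx hxF
      rw [if_pos hmF]
      by_cases hxlt : x < xs.foldl max x
      · rw [if_pos hxlt, idxOf_cons_ne x _ xs (ne_of_lt hxlt)]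
        simp only [Prod.mk.injEq, true_and]
        omega
      · rw [if_neg hxlt]
        have hFx : xs.foldl max x = x := le_antisymm (not_lt.mp hxlt) hxF
        rw [hFx]
        simp [idxOf]
    · rw [if_neg (by simpa using hmx)]
      rw [ih]
      have hmax : max m x = m := max_eq_left (not_lt.mp hmx)
      rw [hmax]
      by_cases hmF : m < xs.foldl max m
      · rw [if_pos hmF, if_pos hmF]
        have hxne : x ≠ xs.foldl max m := ne_of_lt (lt_of_le_of_lt (not_lt.mp hmx) hmF)
        rw [idxOf_cons_ne x _ xs hxne]
        simp only [Prod.mk.injEq, true_and]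
        omega
      · rw [if_neg hmF, if_neg hmF]

theorem inner_full (i : Nat) (row : List Int) (hrow : row ≠ []) (s : Option Int × Nat × Nat) :
    idxFold (gInner i) 0 row s
      = if ltO s.1 (maxOf row) then (some (maxOf row), i, idxOf (maxOf row) row) else s := by
  obtain ⟨x, t, rfl⟩ : ∃ x t, row = x :: t := by
    cases row with
    | nil => exact absurd rfl hrow
    | cons x t => exact ⟨x, t, rfl⟩
  obtain ⟨mv, pr, pc⟩ := s
  cases mv with
  | none =>
    simp only [idxFold, gInner, ltO, if_pos]
    rw [inner_some]
    simp only [maxOf_cons]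
    by_cases hxlt : x < t.foldl max x
    · rw [if_pos hxlt, idxOf_cons_ne x _ t (ne_of_lt hxlt)]
      simp only [Prod.mk.injEq, true_and]
      omega
    · rw [if_neg hxlt]
      have hFx : t.foldl max x = x := le_antisymm (not_lt.mp hxlt) (le_foldl_max_self t x)
      rw [hFx]
      simp [idxOf]
  | some m =>
    rw [inner_some i (x :: t) 0 m pr pc]
    have hfold : (x :: t).foldl max m = max m (maxOf (x :: t)) := by
      simp only [List.foldl_cons, maxOf_cons]
      exact foldl_max_init t m x
    rw [hfold]
    simp only [ltO, maxOf_cons]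
    by_cases hlt : m < t.foldl max x
    · have : max m (t.foldl max x) = t.foldl max x := max_eq_right (le_of_lt hlt)
      rw [this, if_pos hlt]
      simp [hlt]
    · have : max m (t.foldl max x) = m := max_eq_left (not_lt.mp hlt)
      rw [this, if_neg (lt_irrefl m)]
      simp [hlt]

-- A's scan, row by row (the step is exactly what one full inner loop does)
def pickB : Nat → List (List Int) → (Option Int × Nat × Nat) → Option Int × Nat × Nat
  | _, [], s => s
  | k, row :: rest, s =>
      pickB (k + 1) rest
        (if ltO s.1 (maxOf row) then (some (maxOf row), k, idxOf (maxOf row) row) else s)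

theorem scan_eq_pickB (matrix : List (List Int)) (hne : ∀ row ∈ matrix, row ≠ []) :
    kekwScan matrix = pickB 0 matrix (none, 0, 0) := by
  have bridge : kekwScan matrix = idxFold gOuter 0 matrix ((none : Option Int), 0, 0) :=
    foldl_range_getD gOuter [] matrix ((none : Option Int), 0, 0)
  rw [bridge]
  generalize hs : ((none : Option Int), (0 : Nat), (0 : Nat)) = s
  clear hs
  suffices h : ∀ (rows : List (List Int)) (k : Nat) (s : Option Int × Nat × Nat),
      (∀ row ∈ rows, row ≠ []) →
      idxFold gOuter k rows s = pickB k rows s by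
    exact h matrix 0 s hne
  intro rows
  induction rows with
  | nil => intro k s _; rfl
  | cons row rest ih =>
    intro k s hne'
    simp only [idxFold, pickB]
    have hrow : row ≠ [] := hne' row (List.mem_cons_self ..)
    have hinner : gOuter s k row = idxFold (gInner k) 0 row s :=
      foldl_range_getD (gInner k) 0 row s
    rw [hinner, inner_full k row hrow s]
    exact ih (k + 1) _ (fun r hr => hne' r (List.mem_cons_of_mem _ hr))

theorem pickB_some : ∀ (rows : List (List Int)) (k : Nat) (m : Int) (pr pc : Nat),
    pickB k rows (some m, pr, pc)
      = (some ((rows.map maxOf).foldl max m),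
         if m < (rows.map maxOf).foldl max m
         then (k + idxOf ((rows.map maxOf).foldl max m) (rows.map maxOf),
               idxOf ((rows.map maxOf).foldl max m)
                 (rows.getD (idxOf ((rows.map maxOf).foldl max m) (rows.map maxOf)) []))
         else (pr, pc)) := by
  intro rows
  induction rows with
  | nil => intro k m pr pc; simp [pickB]
  | cons row rest ih =>
    intro k m pr pc
    simp only [pickB, List.map_cons, List.foldl_cons, ltO]
    by_cases hm : m < maxOf row
    · rw [if_pos (by simpa using hm), ih]
      have hmax : max m (maxOf row) = maxOf row := max_eq_right (le_of_lt hm)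
      rw [hmax]
      have hMF : maxOf row ≤ (rest.map maxOf).foldl max (maxOf row) := le_foldl_max_self ..
      rw [if_pos (lt_of_lt_of_le hm hMF)]
      by_cases hlt : maxOf row < (rest.map maxOf).foldl max (maxOf row)
      · rw [if_pos hlt, idxOf_cons_ne _ _ _ (ne_of_lt hlt)]
        simp only [List.getD_cons_succ, Prod.mk.injEq, true_and, and_true]
        omega
      · rw [if_neg hlt]
        have hFx : (rest.map maxOf).foldl max (maxOf row) = maxOf row :=
          le_antisymm (not_lt.mp hlt) hMF
        rw [hFx]
        simp [idxOf]
    · rw [if_neg (by simpa using hm), ih]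
      have hmax : max m (maxOf row) = m := max_eq_left (not_lt.mp hm)
      rw [hmax]
      by_cases hmF : m < (rest.map maxOf).foldl max m
      · rw [if_pos hmF, if_pos hmF]
        have hxne : maxOf row ≠ (rest.map maxOf).foldl max m :=
          ne_of_lt (lt_of_le_of_lt (not_lt.mp hm) hmF)
        rw [idxOf_cons_ne _ _ _ hxne]
        simp only [List.getD_cons_succ, Prod.mk.injEq, true_and, and_true]
        omega
      · rw [if_neg hmF, if_neg hmF]

theorem pickB_full (rows : List (List Int)) (hrows : rows ≠ []) :
    pickB 0 rows (none, 0, 0)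
      = (some (maxOf (rows.map maxOf)),
         idxOf (maxOf (rows.map maxOf)) (rows.map maxOf),
         idxOf (maxOf (rows.map maxOf))
           (rows.getD (idxOf (maxOf (rows.map maxOf)) (rows.map maxOf)) [])) := by
  obtain ⟨row, rest, rfl⟩ : ∃ row rest, rows = row :: rest := by
    cases rows with
    | nil => exact absurd rfl hrows
    | cons row rest => exact ⟨row, rest, rfl⟩
  simp only [pickB, ltO, if_pos]
  rw [pickB_some]
  simp only [List.map_cons, maxOf_cons]
  by_cases hlt : maxOf row < (rest.map maxOf).foldl max (maxOf row)
  · rw [if_pos hlt, idxOf_cons_ne _ _ _ (ne_of_lt hlt)]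
    simp only [List.getD_cons_succ, Prod.mk.injEq, true_and, and_true]
    omega
  · rw [if_neg hlt]
    have hFx : (rest.map maxOf).foldl max (maxOf row) = maxOf row :=
      le_antisymm (not_lt.mp hlt) (le_foldl_max_self ..)
    rw [hFx]
    simp [idxOf]

-- the column loop of A is a map
theorem colswap_aux (f : List Int → List Int) :
    ∀ (rest acc : List (List Int)),
      (List.range' acc.length rest.length).foldl
        (fun m i =>
          let row := m.getD i []
          m.set i (f row))
        (acc ++ rest)
        = acc ++ rest.map f := by
  intro rest
  induction rest with
  | nil => intro acc; simp
  | cons x xs ih =>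
    intro acc
    simp only [List.length_cons]
    rw [List.range'_succ, List.foldl_cons]
    simp only [getD_append_len, set_append_len]
    have h' := ih (acc ++ [f x])
    simpa using h'

theorem kekwColSwap_eq_map (mc : Nat) (m : List (List Int)) :
    kekwColSwap mc m = m.map (fun row => (row.set 0 (row.getD mc 0)).set mc (row.getD 0 0)) := by
  have h := colswap_aux (fun row => (row.set 0 (row.getD mc 0)).set mc (row.getD 0 0)) m []
  simp only [List.nil_append, List.length_nil] at h
  unfold kekwColSwap
  rw [List.range_eq_range']
  exact h

-- small facts about maxOf / idxOf
theorem maxOf_mem (l : List Int) (hl : l ≠ []) : maxOf l ∈ l := by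
  obtain ⟨x, t, rfl⟩ : ∃ x t, l = x :: t := by
    cases l with
    | nil => exact absurd rfl hl
    | cons x t => exact ⟨x, t, rfl⟩
  suffices h : ∀ (t : List Int) (a : Int), t.foldl max a ∈ a :: t by
    simpa [maxOf_cons] using h t x
  intro t
  induction t with
  | nil => intro a; simp
  | cons y t ih =>
    intro a
    simp only [List.foldl_cons]
    have h := ih (max a y)
    rcases List.mem_cons.mp h with h1 | h1
    · rw [h1]
      rcases max_choice a y with hc | hc <;> rw [hc] <;> simp
    · simp [List.mem_cons, h1]

theorem index?_getD_eq_idxOf (l : List Int) (v : Int) (hv : v ∈ l) :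
    (PySem.List.index? l v).getD 0 = idxOf v l := by
  induction l with
  | nil => cases hv
  | cons x xs ih =>
    by_cases h : x = v
    · subst h
      rw [PySem.List.index?_cons_self x xs]
      simp [idxOf]
    · rw [PySem.List.index?_cons_of_ne xs h, idxOf_cons_ne x v xs h]
      have hv' : v ∈ xs := by
        rcases List.mem_cons.mp hv with h1 | h1
        · exact absurd h1.symm h
        · exact h1
      have := ih hv'
      cases hidx : PySem.List.index? xs v with
      | none =>
        exact absurd hv' ((PySem.List.index?_eq_none_iff xs v).mp hidx)
      | some k =>
        rw [hidx] at this
        simp at this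
        simp [this]

theorem idxOf_lt_length (l : List Int) (v : Int) (hv : v ∈ l) : idxOf v l < l.length := by
  induction l with
  | nil => cases hv
  | cons x xs ih =>
    by_cases h : x = v
    · simp [idxOf, h]
    · rw [idxOf_cons_ne x v xs h]
      have hv' : v ∈ xs := by
        rcases List.mem_cons.mp hv with h1 | h1
        · exact absurd h1.symm h
        · exact h1
      simpa using ih hv'

theorem getD_idxOf (l : List Int) (v : Int) (hv : v ∈ l) (d : Int) : l.getD (idxOf v l) d = v := by
  induction l with
  | nil => cases hv
  | cons x xs ih =>
    by_cases h : x = v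
    · simp [idxOf, h]
    · rw [idxOf_cons_ne x v xs h]
      have hv' : v ∈ xs := by
        rcases List.mem_cons.mp hv with h1 | h1
        · exact absurd h1.symm h
        · exact h1
      simpa using ih hv'

theorem getD_map_maxOf (l : List (List Int)) (r : Nat) (hr : r < l.length) :
    (l.map maxOf).getD r 0 = maxOf (l.getD r []) := by
  induction l generalizing r with
  | nil => simp at hr
  | cons x xs ih =>
    cases r with
    | zero => simp
    | succ r => simpa using ih r (by simpa using hr)

theorem getD_mem (l : List (List Int)) (r : Nat) (hr : r < l.length) : l.getD r [] ∈ l := by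
  rw [List.getD_eq_getElem l [] hr]
  exact List.getElem_mem hr

-- ===== VERDICT (by name: the statement is the Claim_ definition above) =====
theorem kekw_spec : Claim_equal_kekw := by
  intro matrix _ hpre
  unfold Spec_kekw
  obtain ⟨hMne, hne, -⟩ := hpre
  -- names for the argmax data
  set bests := matrix.map maxOf with hbests
  set v := maxOf bests with hv
  set r := idxOf v bests with hr
  set c := idxOf v (matrix.getD r []) with hc
  have hbne : bests ≠ [] := by
    rw [hbests]
    simpa using hMne
  have hvmem : v ∈ bests := maxOf_mem bests hbne
  have hrlt : r < matrix.length := by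
    have := idxOf_lt_length bests v hvmem
    simpa [hbests] using this
  have hrowr : matrix.getD r [] ∈ matrix := getD_mem matrix r hrlt
  have hrowr_ne : matrix.getD r [] ≠ [] := hne _ hrowr
  have hbestr : maxOf (matrix.getD r []) = v := by
    have h1 : bests.getD r 0 = v := getD_idxOf bests v hvmem 0
    have h2 : bests.getD r 0 = maxOf (matrix.getD r []) := by
      simpa [hbests] using getD_map_maxOf matrix r hrlt
    rw [← h2, h1]
  have hvrow : v ∈ matrix.getD r [] := hbestr ▸ maxOf_mem _ hrowr_ne
  -- A's scan computes exactly (v, r, c)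
  have hscan : kekwScan matrix = (some v, r, c) := by
    rw [scan_eq_pickB matrix hne, pickB_full matrix hMne]
  -- B's PySem computations agree
  have hbestsB : matrix.map (fun row => (PySem.List.max? row (fun y => y)).getD 0) = bests := by
    rw [hbests]
    apply List.map_congr_left
    intro row hrow
    obtain ⟨x, t, rfl⟩ : ∃ x t, row = x :: t := by
      cases row with
      | nil => exact absurd rfl (hne _ hrow)
      | cons x t => exact ⟨x, t, rfl⟩
    rw [PySem.List.max?_id_cons]
    rfl
  have hvB : (PySem.List.max? bests (fun y => y)).getD 0 = v := by
    obtain ⟨b, bs, hbb⟩ : ∃ b bs, bests = b :: bs := by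
      cases hbx : bests with
      | nil => exact absurd hbx hbne
      | cons b bs => exact ⟨b, bs, rfl⟩
    rw [hbb, PySem.List.max?_id_cons, hv, hbb]
    rfl
  have hrB : (PySem.List.index? bests v).getD 0 = r := index?_getD_eq_idxOf bests v hvmem
  have hcB : (PySem.List.index? (matrix.getD r []) v).getD 0 = c := index?_getD_eq_idxOf _ v hvrow
  -- assemble
  show kekw matrix = kekw_alt matrix
  unfold kekw kekw_alt
  simp only [hscan, hbestsB, hvB, hrB, hcB]
  exact kekwColSwap_eq_map c _
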